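-- pv_equiv track=rewrite | github.com/citp/ott-tracking | src/blocklistparser/utils.py | get_categories_classes
-- ===== SOURCE A (Python) =====
-- def get_categories_classes(bug_db):
--     bugs = bug_db
--     apps = bugs['apps']
--     categories_classes = {}
--     categories_classes['NotBlocked'] = 0
--     num_classes = 1
--     for app_id in apps:
--         app_info = apps[app_id]
--         cat = app_info['cat']
--         if cat not in categories_classes:
--             categories_classes[cat] = num_classes
--             num_classes += 1
--     return categories_classes
-- ===== SOURCE B (Python) =====
-- def get_categories_classes(bug_db):
--     apps = bug_db['apps']
--     cats = [apps[app_id]['cat'] for app_id in apps]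
--     # sort the distinct categories by the position of their first occurrence;
--     # the key is injective, so the arbitrary set order does not matter
--     order = sorted(set(cats) - {'NotBlocked'}, key=cats.index)
--     result = {'NotBlocked': 0}
--     for rank, cat in enumerate(order, start=1):
--         result[cat] = rank
--     return result
-- ===== Notes on version B (the rewrite author's own statement) =====
-- stated objective: alternative
-- what changed: Replaces A's single membership-checking pass with an incremented counter by a sort-based algorithm: build the set of categories, sort it by index of first occurrence, and enumerate the sorted list to assign the class indices.
import Mathlib
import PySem

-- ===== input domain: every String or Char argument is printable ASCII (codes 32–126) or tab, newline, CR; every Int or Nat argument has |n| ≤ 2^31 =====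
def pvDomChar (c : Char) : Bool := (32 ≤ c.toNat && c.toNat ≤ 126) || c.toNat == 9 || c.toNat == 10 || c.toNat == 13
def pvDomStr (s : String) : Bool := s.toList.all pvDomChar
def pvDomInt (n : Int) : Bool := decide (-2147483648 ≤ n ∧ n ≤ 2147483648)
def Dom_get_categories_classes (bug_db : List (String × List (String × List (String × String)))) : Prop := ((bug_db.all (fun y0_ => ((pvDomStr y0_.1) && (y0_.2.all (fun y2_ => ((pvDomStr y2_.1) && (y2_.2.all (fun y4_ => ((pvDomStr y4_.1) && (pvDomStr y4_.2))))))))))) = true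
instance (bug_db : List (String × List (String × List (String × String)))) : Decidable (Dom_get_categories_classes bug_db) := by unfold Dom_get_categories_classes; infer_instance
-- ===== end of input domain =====

-- B replaces A's single membership-checking pass (growing dict + running counter) by a
-- sort-based algorithm: sort the distinct categories by first-occurrence index, then
-- enumerate (objective: alternative).

-- ===== PORT A =====
-- single pass: for each app, look up its category and, if unseen, insert it with the next class index
def get_categories_classes (bug_db : List (String × List (String × List (String × String)))) : List (String × Int) :=
  let apps := ((PySem.Dict.mk bug_db).get? "apps").getD []
  let init : PySem.Dict String Int × Int := ((PySem.Dict.empty.insert "NotBlocked" 0), 1)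
  (apps.foldl (fun (st : PySem.Dict String Int × Int) p =>
      let cat := ((PySem.Dict.mk p.2).get? "cat").getD ""
      if st.1.contains cat then st
      else (st.1.insert cat st.2, st.2 + 1)) init).1.items

-- ===== PORT B =====
-- sorted(set(cats) - {'NotBlocked'}, key=cats.index): every element of the set is in cats,
-- so cats.index never raises; its port is (index? cats c).getD 0, exact on those elements.
def get_categories_classes_alt (bug_db : List (String × List (String × List (String × String)))) : List (String × Int) :=
  let apps := ((PySem.Dict.mk bug_db).get? "apps").getD []
  let cats := apps.map (fun p => ((PySem.Dict.mk p.2).get? "cat").getD "")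
  let order := PySem.List.sorted (PySem.Set.diff (PySem.Set.ofList cats) ["NotBlocked"])
      (fun c => ((PySem.List.index? cats c).getD 0 : Nat)) false
  ((PySem.List.enumerate order 1).foldl (fun (d : PySem.Dict String Int) q => d.insert q.2 q.1)
    (PySem.Dict.empty.insert "NotBlocked" 0)).items

-- ===== PRECONDITION & SPEC =====
-- Pre_ excludes exactly the inputs where A raises KeyError: no 'apps' key, or some app record
-- without a 'cat' key (B raises the same KeyError there).
def Pre_get_categories_classes (bug_db : List (String × List (String × List (String × String)))) : Prop :=
  ∃ apps, (PySem.Dict.mk bug_db).get? "apps" = some apps ∧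
    ∀ p ∈ apps, ((PySem.Dict.mk p.2).get? "cat").isSome
instance (bug_db : List (String × List (String × List (String × String)))) : Decidable (Pre_get_categories_classes bug_db) := by unfold Pre_get_categories_classes; infer_instance
def pvWitness_get_categories_classes : (List (String × List (String × List (String × String)))) :=
  [("apps", [("a1", [("cat", "ads")]), ("a2", [("cat", "NotBlocked")]), ("a3", [("cat", "ads")])])]
def Spec_get_categories_classes (bug_db : List (String × List (String × List (String × String)))) (out : List (String × Int)) : Prop := out = get_categories_classes_alt bug_db
instance (bug_db : List (String × List (String × List (String × String)))) (out : List (String × Int)) : Decidable (Spec_get_categories_classes bug_db out) := by unfold Spec_get_categories_classes; infer_instance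

-- ===== CLAIM (what is proved, stated in full; the proofs are below) =====
def Claim_equal_get_categories_classes : Prop := ∀ (bug_db : List (String × List (String × List (String × String)))), Dom_get_categories_classes bug_db → Pre_get_categories_classes bug_db → Spec_get_categories_classes bug_db (get_categories_classes bug_db)

-- ===== LEMMAS AND PROOFS =====

-- the items list "NotBlocked ↦ 0, u[0] ↦ 1, u[1] ↦ 2, …"
def pvIdx (u : List String) : List (String × Int) :=
  ("NotBlocked", (0 : Int)) :: (PySem.List.enumerate u 1).map (fun q => (q.2, q.1))

-- the new (non-'NotBlocked') categories of cs, deduplicated against the already-assigned u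
def pvNew (u : List String) : List String → List String
  | [] => []
  | c :: cs => if c = "NotBlocked" ∨ c ∈ u then pvNew u cs else c :: pvNew (u ++ [c]) cs

theorem pvNew_cons_pos (u : List String) (c : String) (cs : List String)
    (h : c = "NotBlocked" ∨ c ∈ u) : pvNew u (c :: cs) = pvNew u cs := by
  simp only [pvNew]; rw [if_pos h]

theorem pvNew_cons_neg (u : List String) (c : String) (cs : List String)
    (h : ¬ (c = "NotBlocked" ∨ c ∈ u)) : pvNew u (c :: cs) = c :: pvNew (u ++ [c]) cs := by
  simp only [pvNew]; rw [if_neg h]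

theorem pvIdx_contains (u : List String) (c : String) :
    (PySem.Dict.mk (pvIdx u)).contains c = decide (c = "NotBlocked" ∨ c ∈ u) := by
  have h1 : ((PySem.List.enumerate u 1).any fun q => q.2 == c) = u.any (· == c) := by
    conv_rhs => rw [← PySem.List.map_snd_enumerate (xs := u) (s := 1)]
    rw [List.any_map]
    rfl
  simp only [pvIdx, PySem.Dict.contains, List.any_cons, List.any_map, Function.comp_def, h1]
  rw [show ("NotBlocked" == c) = decide (c = "NotBlocked") from by
    rw [Bool.beq_eq_decide_eq]; simp [eq_comm]]
  simp [List.any_beq']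

theorem pvIdx_insert (u : List String) (c : String)
    (h : ¬ (c = "NotBlocked" ∨ c ∈ u)) :
    (PySem.Dict.mk (pvIdx u)).insert c ((u.length : Int) + 1) = PySem.Dict.mk (pvIdx (u ++ [c])) := by
  have hc : (PySem.Dict.mk (pvIdx u)).contains c = false := by
    rw [pvIdx_contains]
    exact decide_eq_false h
  apply PySem.Dict.ext
  rw [PySem.Dict.items_insert_of_not_contains _ _ hc]
  simp [pvIdx, PySem.List.enumerate_append, PySem.List.enumerate, add_comm]

-- A's loop (category lookup inlined, zeta-reduced), from an arbitrary already-assigned prefix u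
theorem pvLoop (ps : List (String × List (String × String))) (u : List String) :
    (ps.foldl (fun (st : PySem.Dict String Int × Int) p =>
        if st.1.contains (((PySem.Dict.mk p.2).get? "cat").getD "") then st
        else (st.1.insert (((PySem.Dict.mk p.2).get? "cat").getD "") st.2, st.2 + 1))
      (PySem.Dict.mk (pvIdx u), (u.length : Int) + 1)).1
    = PySem.Dict.mk (pvIdx (u ++ pvNew u
        (ps.map (fun p => ((PySem.Dict.mk p.2).get? "cat").getD "")))) := by
  induction ps generalizing u with
  | nil => simp [pvNew]
  | cons p ps ih =>
    simp only [List.foldl_cons, List.map_cons]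
    by_cases h : ((PySem.Dict.mk p.2).get? "cat").getD "" = "NotBlocked"
        ∨ ((PySem.Dict.mk p.2).get? "cat").getD "" ∈ u
    · rw [pvIdx_contains, decide_eq_true h, if_pos rfl, pvNew_cons_pos _ _ _ h]
      exact ih u
    · rw [pvIdx_contains, decide_eq_false h]
      rw [if_neg (by simp), pvIdx_insert u _ h, pvNew_cons_neg _ _ _ h]
      have h2 := ih (u ++ [((PySem.Dict.mk p.2).get? "cat").getD ""])
      have hlen : (((u ++ [((PySem.Dict.mk p.2).get? "cat").getD ""]).length : Int)) = (u.length : Int) + 1 := by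
        simp
      rw [hlen] at h2
      rw [h2, List.append_assoc]
      simp

-- B's dedup-and-filter computes pvNew, from an arbitrary seen set s
theorem pvDedup (cs : List String) (s : List String) :
    (cs.foldl PySem.Set.add s).filter (fun c => c ≠ "NotBlocked")
    = s.filter (fun c => c ≠ "NotBlocked")
      ++ pvNew (s.filter (fun c => c ≠ "NotBlocked")) cs := by
  induction cs generalizing s with
  | nil => simp [pvNew]
  | cons c cs ih =>
    by_cases hm : c ∈ s
    · rw [List.foldl_cons, PySem.Set.add_of_mem hm, ih]
      by_cases hnb : c = "NotBlocked"
      · rw [pvNew_cons_pos _ _ _ (Or.inl hnb)]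
      · have hmem : c ∈ s.filter (fun c => c ≠ "NotBlocked") := by
          rw [List.mem_filter]; exact ⟨hm, by simpa using hnb⟩
        rw [pvNew_cons_pos _ _ _ (Or.inr hmem)]
    · rw [List.foldl_cons, PySem.Set.add_of_not_mem hm, ih]
      by_cases hnb : c = "NotBlocked"
      · have hfe : (s ++ [c]).filter (fun c => c ≠ "NotBlocked")
            = s.filter (fun c => c ≠ "NotBlocked") := by
          simp [List.filter_append, hnb]
        rw [hfe, pvNew_cons_pos _ _ _ (Or.inl hnb)]
      · have hnmem : c ∉ s.filter (fun c => c ≠ "NotBlocked") := by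
          rw [List.mem_filter]; intro hc; exact hm hc.1
        have hf : (s ++ [c]).filter (fun c => c ≠ "NotBlocked")
            = s.filter (fun c => c ≠ "NotBlocked") ++ [c] := by
          simp [List.filter_append, hnb]
        rw [hf, pvNew_cons_neg _ _ _ (by rintro (h1 | h2); exact hnb h1; exact hnmem h2)]
        simp [List.append_assoc]

theorem pvNew_nil_eq (cats : List String) :
    pvNew [] cats = (PySem.Set.ofList cats).filter (fun c => c ≠ "NotBlocked") := by
  have := pvDedup cats []
  simpa [PySem.Set.ofList_eq_foldl] using this.symm

-- set(cats) in first-occurrence order is strictly increasing under the first-index key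
theorem pvOfListPairwise (cats : List String) :
    (PySem.Set.ofList cats).Pairwise
      (fun a b => ((PySem.List.index? cats a).getD 0 : Nat) < (PySem.List.index? cats b).getD 0) := by
  induction cats using List.reverseRecOn with
  | nil => simp [PySem.Set.ofList_eq_foldl]
  | append_singleton xs c ih =>
    have hof : PySem.Set.ofList (xs ++ [c]) = PySem.Set.add (PySem.Set.ofList xs) c := by
      simp [PySem.Set.ofList_eq_foldl, List.foldl_append]
    have hkey : ∀ a ∈ xs, PySem.List.index? (xs ++ [c]) a = PySem.List.index? xs a :=
      fun a ha => PySem.List.index?_append_of_mem [c] ha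
    have himp : (PySem.Set.ofList xs).Pairwise
        (fun a b => ((PySem.List.index? (xs ++ [c]) a).getD 0 : Nat)
          < (PySem.List.index? (xs ++ [c]) b).getD 0) := by
      refine List.Pairwise.imp_of_mem ?_ ih
      intro a b ha hb h
      rw [hkey a ((PySem.Set.mem_ofList xs a).1 ha), hkey b ((PySem.Set.mem_ofList xs b).1 hb)]
      exact h
    by_cases hc : c ∈ xs
    · rw [hof, PySem.Set.add_of_mem ((PySem.Set.mem_ofList xs c).2 hc)]
      exact himp
    · rw [hof, PySem.Set.add_of_not_mem (fun h => hc ((PySem.Set.mem_ofList xs c).1 h)), List.pairwise_append]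
      refine ⟨himp, List.pairwise_singleton _ _, ?_⟩
      intro a ha b hb
      rw [List.mem_singleton] at hb
      subst hb
      have haxs := (PySem.Set.mem_ofList xs a).1 ha
      have hs : (PySem.List.index? xs a).isSome := (PySem.List.index?_isSome_iff xs a).2 haxs
      obtain ⟨k, hk⟩ := Option.isSome_iff_exists.mp hs
      obtain ⟨hlt, -, -⟩ := PySem.List.getElem_of_index?_eq_some hk
      rw [hkey a haxs, PySem.List.index?_append_singleton_self xs b hc, hk]
      simpa using hlt

-- the sorted set-difference IS pvNew [] cats
theorem pvOrder (cats : List String) :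
    PySem.List.sorted (PySem.Set.diff (PySem.Set.ofList cats) ["NotBlocked"])
      (fun c => ((PySem.List.index? cats c).getD 0 : Nat)) false
    = pvNew [] cats := by
  have hdiff : PySem.Set.diff (PySem.Set.ofList cats) ["NotBlocked"]
      = (PySem.Set.ofList cats).filter (fun c => c ≠ "NotBlocked") := by
    show List.filter _ _ = _
    apply List.filter_congr
    intro x _
    simp only [PySem.Set.contains_eq_listContains]
    simp
  rw [hdiff, pvNew_nil_eq cats]
  exact PySem.List.sorted_eq_of_perm_of_pairwise_lt _ _ _ (List.Perm.refl _)
    ((pvOfListPairwise cats).filter _)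

-- B's enumerate-insert loop over fresh non-'NotBlocked' keys produces pvIdx
theorem pvFill (u : List String) (hnb : "NotBlocked" ∉ u) (hnd : u.Nodup) :
    ((PySem.List.enumerate u 1).foldl (fun (d : PySem.Dict String Int) q => d.insert q.2 q.1)
      (PySem.Dict.empty.insert "NotBlocked" 0)).items = pvIdx u := by
  have h1 : ∀ q ∈ PySem.List.enumerate u 1,
      (PySem.Dict.empty.insert "NotBlocked" (0 : Int)).contains q.2 = false := by
    intro q hq
    rw [PySem.List.mem_enumerate_iff] at hq
    obtain ⟨k, hk, rfl⟩ := hq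
    have hne : u[k] ≠ "NotBlocked" := fun h => hnb (h ▸ u.getElem_mem hk)
    simp [PySem.Dict.contains_insert, PySem.Dict.contains_empty, hne]
  have h2 : ((PySem.List.enumerate u 1).map (fun q => q.2)).Nodup := by
    rw [PySem.List.map_snd_enumerate]
    exact hnd
  have h3 := PySem.Dict.items_foldl_insert_fresh (PySem.List.enumerate u 1)
    (fun q => q.2) (fun q => q.1) (PySem.Dict.empty.insert "NotBlocked" 0) h1 h2
  rw [h3]
  have h4 : (PySem.Dict.empty.insert "NotBlocked" (0 : Int)).items = [("NotBlocked", 0)] := by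
    decide
  rw [h4]
  rfl

-- the whole function, stated over the extracted apps list (both sides zeta-reduced)
theorem pvMain (apps : List (String × List (String × String))) :
    (apps.foldl (fun (st : PySem.Dict String Int × Int) p =>
        if st.1.contains (((PySem.Dict.mk p.2).get? "cat").getD "") then st
        else (st.1.insert (((PySem.Dict.mk p.2).get? "cat").getD "") st.2, st.2 + 1))
      ((PySem.Dict.empty.insert "NotBlocked" 0), 1)).1.items
    = ((PySem.List.enumerate
          (PySem.List.sorted
            (PySem.Set.diff (PySem.Set.ofList (apps.map (fun p => ((PySem.Dict.mk p.2).get? "cat").getD "")))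
              ["NotBlocked"])
            (fun c => ((PySem.List.index? (apps.map (fun p => ((PySem.Dict.mk p.2).get? "cat").getD "")) c).getD 0 : Nat)) false) 1).foldl
        (fun (d : PySem.Dict String Int) q => d.insert q.2 q.1)
        (PySem.Dict.empty.insert "NotBlocked" 0)).items := by
  set cats := apps.map (fun p => ((PySem.Dict.mk p.2).get? "cat").getD "") with hcats
  have hinit : (PySem.Dict.empty.insert "NotBlocked" (0 : Int)) = PySem.Dict.mk (pvIdx []) := by
    decide
  have h0 := pvLoop apps []
  simp only [List.length_nil, Nat.cast_zero, zero_add, List.nil_append, ← hcats] at h0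
  have hfilt := pvNew_nil_eq cats
  have hnb : "NotBlocked" ∉ pvNew [] cats := by
    rw [hfilt]; simp [List.mem_filter]
  have hnd : (pvNew [] cats).Nodup := by
    rw [hfilt]; exact (PySem.Set.nodup_ofList cats).filter _
  conv_lhs => rw [hinit, h0]
  rw [pvOrder cats, pvFill _ hnb hnd]

-- ===== VERDICT (by name: the statement is the Claim_ definition above) =====
theorem get_categories_classes_spec : Claim_equal_get_categories_classes := by
  intro bug_db _ _
  exact pvMain (((PySem.Dict.mk bug_db).get? "apps").getD [])
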